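-- pv_equiv track=rewrite | github.com/levuloihust99/openqa-crawling | preprocess.py | remove_last_row
-- ===== SOURCE A (Python) =====
-- def remove_last_row(text):
--     text = text.split("\n")
--
--     try:
--         while not text[-1]:
--             text.pop()
--         text.pop()
--     except Exception as e:
--         return ""
--
--     return "\n".join(text)
-- ===== SOURCE B (Python) =====
-- def remove_last_row(text):
--     s = text.rstrip("\n")
--     head, _sep, _tail = s.rpartition("\n")
--     return head
-- ===== Notes on version B (the rewrite author's own statement) =====
-- stated objective: idiomatic
-- what changed: Replaces split-into-list + pop-loop + rejoin with direct string operations: an rstrip of trailing newline characters removes the trailing blank lines at once, and an rpartition on the newline yields everything before the last remaining row (empty when no newline is left).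
import Mathlib
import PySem

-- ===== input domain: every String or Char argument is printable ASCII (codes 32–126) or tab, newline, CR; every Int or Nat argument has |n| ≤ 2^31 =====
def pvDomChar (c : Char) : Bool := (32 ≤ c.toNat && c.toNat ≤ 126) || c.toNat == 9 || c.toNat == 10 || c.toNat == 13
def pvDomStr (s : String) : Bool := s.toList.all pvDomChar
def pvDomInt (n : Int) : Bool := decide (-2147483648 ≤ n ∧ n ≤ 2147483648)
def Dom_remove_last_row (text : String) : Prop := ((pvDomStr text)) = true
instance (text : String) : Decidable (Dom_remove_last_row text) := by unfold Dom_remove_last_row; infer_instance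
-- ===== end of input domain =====

-- B replaces A's split-into-list + pop-loop + rejoin by direct string operations
-- (rstrip('\n') then rpartition('\n')); idiomatic, same linear cost.

-- ===== PORT A =====
-- the 'while not text[-1]: text.pop()' loop; none = the IndexError caught by A's except
def rlrPopBlanks (l : List String) : Option (List String) :=
  match h : PySem.List.pyGet? l (-1) with
  | none => none
  | some s => if s = "" then rlrPopBlanks l.dropLast else some l
termination_by l.length
decreasing_by
  cases l with
  | nil => simp [PySem.List.pyGet?, PySem.List.pyIdx?] at h
  | cons a t => simp [List.length_dropLast]

def remove_last_row (text : String) : String :=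
  match PySem.Str.split? text "\n" with
  | none => ""                    -- unreachable: the separator "\n" is not empty
  | some parts =>
    match rlrPopBlanks parts with
    | none => ""                  -- A's except-branch: IndexError from text[-1]
    | some l =>
      match PySem.List.pop? l with
      | none => ""                -- A's except-branch: IndexError from pop()
      | some (_, rest) => PySem.Str.join "\n" rest

-- ===== PORT B =====
def remove_last_row_alt (text : String) : String :=
  -- s = text.rstrip("\n"): drop trailing '\n' characters (hand port, exact: PySem has no rstrip-with-chars)
  let s : List Char := (text.toList.reverse.dropWhile (fun c => c == '\n')).reverse
  -- head, _sep, _tail = s.rpartition("\n"): head = everything before the LAST '\n', "" if none (hand port, exact)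
  String.ofList ((s.reverse.dropWhile (fun c => c != '\n')).tail).reverse

-- ===== PRECONDITION & SPEC =====
def Spec_remove_last_row (text : String) (out : String) : Prop := out = remove_last_row_alt text
instance (text : String) (out : String) : Decidable (Spec_remove_last_row text out) := by unfold Spec_remove_last_row; infer_instance

-- ===== CLAIM (what is proved, stated in full; the proofs are below) =====
def Claim_equal_remove_last_row : Prop := ∀ (text : String), Dom_remove_last_row text → Spec_remove_last_row text (remove_last_row text)

-- ===== LEMMAS AND PROOFS =====

theorem pv_str_eq {a b : String} (h : a.toList = b.toList) : a = b := by
  rw [← @String.ofList_toList a, h, String.ofList_toList]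

theorem pv_modifyHead_id {α : Type} (l : List α) : List.modifyHead (fun x => x) l = l := by
  cases l <;> rfl

-- PySem.Chars.splitOn with a single-character separator is Mathlib's List.splitOn
theorem pv_go_single (x : Char) : ∀ (fuel : Nat) (l cur : List Char) (acc : List (List Char)),
    l.length < fuel →
    PySem.Chars.splitOn.go [x] fuel l cur acc
      = acc.reverse ++ (List.splitOn x l).modifyHead (cur.reverse ++ ·) := by
  intro fuel
  induction fuel with
  | zero => intro l cur acc h; omega
  | succ n ih =>
    intro l cur acc h
    cases l with
    | nil =>
      rw [PySem.Chars.splitOn.go.eq_def]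
      simp [List.splitOn]
    | cons c rest =>
      have hlen : rest.length < n := by simp at h; omega
      rw [PySem.Chars.splitOn.go.eq_def]
      by_cases hc : c = x
      · subst hc
        have hpre : List.isPrefixOf [c] (c :: rest) = true := by simp [List.isPrefixOf]
        simp only [hpre, if_pos]
        rw [ih _ [] (cur.reverse :: acc) (by simpa using hlen)]
        simp [List.splitOn, List.splitOnP_cons]
        exact pv_modifyHead_id _
      · have hpre : List.isPrefixOf [x] (c :: rest) = false := by
          simp [List.isPrefixOf]
          exact fun hh => (hc hh.symm).elim
        simp only [hpre]
        simp only [Bool.false_eq_true, if_false]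
        rw [ih rest (c :: cur) acc hlen]
        have hbe : (c == x) = false := by simp [hc]
        simp [List.splitOn, List.splitOnP_cons, hbe, List.modifyHead_modifyHead]
        rfl

theorem pv_splitOn_single (x : Char) (cs : List Char) :
    PySem.Chars.splitOn cs [x] = List.splitOn x cs := by
  rw [PySem.Chars.splitOn, pv_go_single x (cs.length + 1) cs [] [] (by omega)]
  simp
  exact pv_modifyHead_id _

-- the pieces of splitOn never contain the separator
theorem pv_splitOnP_free {α : Type} (p : α → Bool) (cs : List α) :
    ∀ l ∈ cs.splitOnP p, ∀ a ∈ l, ¬ p a := by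
  induction cs with
  | nil => simp [List.splitOnP_nil]
  | cons c t ih =>
    intro l hl a ha
    rw [List.splitOnP_cons] at hl
    by_cases hp : p c
    · simp [hp] at hl
      rcases hl with h | h
      · subst h; simp at ha
      · exact ih l h a ha
    · simp [hp] at hl
      obtain ⟨hd, tl, htl⟩ := List.exists_cons_of_ne_nil (List.splitOnP_ne_nil p t)
      rw [htl] at hl
      simp at hl
      rcases hl with h | h
      · subst h
        rcases List.mem_cons.mp ha with h' | h'
        · subst h'; exact fun hh => hp hh
        · exact ih hd (htl ▸ List.mem_cons_self) a h'
      · exact ih l (htl ▸ List.mem_cons_of_mem _ h) a ha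

theorem pv_splitOn_free (x : Char) (cs : List Char) :
    ∀ l ∈ cs.splitOn x, x ∉ l := by
  intro l hl hx
  have := pv_splitOnP_free (· == x) cs l hl x hx
  simp at this

theorem pv_pyGet?_neg_one {α : Type} (xs : List α) :
    PySem.List.pyGet? xs (-1) = xs.getLast? := by
  cases xs with
  | nil => simp [PySem.List.pyGet?, PySem.List.pyIdx?]
  | cons a t =>
    simp [PySem.List.pyGet?, PySem.List.pyIdx?]
    rw [List.getLast?_eq_getElem?]
    norm_num

theorem pv_pop_concat {α : Type} (xs : List α) (x : α) :
    PySem.List.pop? (xs ++ [x]) = some (x, xs) := by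
  simp [PySem.List.pop?, PySem.List.pyIdx?]
  rw [List.eraseIdx_append_of_length_le (Nat.le_refl _)]
  simp

theorem pv_rlr_nil : rlrPopBlanks [] = none := by
  rw [rlrPopBlanks]
  split
  · rfl
  · rename_i s h
    rw [pv_pyGet?_neg_one] at h
    simp at h

theorem pv_rlr_blank (ps : List String) : rlrPopBlanks (ps ++ [""]) = rlrPopBlanks ps := by
  rw [rlrPopBlanks]
  split
  · rename_i h
    rw [pv_pyGet?_neg_one, List.getLast?_concat] at h
    exact absurd h (by simp)
  · rename_i s h
    rw [pv_pyGet?_neg_one, List.getLast?_concat] at h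
    injection h with h
    subst h
    simp

theorem pv_rlr_stop (ps : List String) (x : String) (hx : x ≠ "") :
    rlrPopBlanks (ps ++ [x]) = some (ps ++ [x]) := by
  rw [rlrPopBlanks]
  split
  · rename_i h
    rw [pv_pyGet?_neg_one, List.getLast?_concat] at h
    exact absurd h (by simp)
  · rename_i s h
    rw [pv_pyGet?_neg_one, List.getLast?_concat] at h
    injection h with h
    subst h
    simp [hx]

theorem pv_dropWhile_pass {α : Type} (p : α → Bool) (l r : List α) (h : ∀ a ∈ l, p a = true) :
    List.dropWhile p (l ++ r) = List.dropWhile p r := by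
  induction l with
  | nil => rfl
  | cons a t ih =>
    simp only [List.cons_append, List.dropWhile_cons, h a List.mem_cons_self, if_pos]
    exact ih (fun a ha => h a (List.mem_cons_of_mem _ ha))

-- B ignores one trailing '\n'
theorem pv_alt_drop (cs : List Char) :
    remove_last_row_alt (String.ofList (cs ++ ['\n'])) = remove_last_row_alt (String.ofList cs) := by
  simp [remove_last_row_alt]

-- B on a newline-free string is ""
theorem pv_alt_free (q : List Char) (hfree : '\n' ∉ q) :
    remove_last_row_alt (String.ofList q) = "" := by
  have hd : List.dropWhile (fun c => c != '\n')
      (((List.dropWhile (fun c => c == '\n') q.reverse).reverse).reverse) = [] := by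
    rw [List.reverse_reverse, List.dropWhile_eq_nil_iff]
    intro a ha
    have : a ∈ q := List.mem_reverse.mp ((List.dropWhile_sublist _).mem ha)
    simp
    intro h; exact hfree (h ▸ this)
  simp only [remove_last_row_alt, String.toList_ofList, hd, List.tail_nil, List.reverse_nil]

-- B on ics ++ '\n' :: q with q nonempty and newline-free returns ics
theorem pv_alt_mid (ics q : List Char) (hq : q ≠ []) (hfree : '\n' ∉ q) :
    remove_last_row_alt (String.ofList (ics ++ '\n' :: q)) = String.ofList ics := by
  obtain ⟨a, t, hqr⟩ : ∃ a t, q.reverse = a :: t := by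
    cases hq' : q.reverse with
    | nil => exact absurd (List.reverse_eq_nil_iff.mp hq') hq
    | cons a t => exact ⟨a, t, rfl⟩
  have hmem : ∀ c ∈ (a :: t), c ∈ q := by
    intro c hc; exact List.mem_reverse.mp (hqr ▸ hc)
  have ha' : (a == '\n') = false := by
    simp; intro h; exact hfree (h ▸ hmem a List.mem_cons_self)
  have hshape : (ics ++ '\n' :: q).reverse = a :: (t ++ '\n' :: ics.reverse) := by
    rw [List.reverse_append, List.reverse_cons, hqr]
    simp
  have hstrip : List.dropWhile (fun c => c == '\n') ((ics ++ '\n' :: q).reverse)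
      = a :: (t ++ '\n' :: ics.reverse) := by
    rw [hshape, List.dropWhile_cons, ha']
    simp
  have hpart : List.dropWhile (fun c => c != '\n') (a :: (t ++ '\n' :: ics.reverse))
      = '\n' :: ics.reverse := by
    have : (a :: (t ++ '\n' :: ics.reverse)) = (a :: t) ++ '\n' :: ics.reverse := by simp
    rw [this, pv_dropWhile_pass _ (a :: t) _ ?hpass]
    · rw [List.dropWhile_cons]; simp
    · intro c hc
      simp; intro h; exact hfree (h ▸ hmem c hc)
  simp only [remove_last_row_alt, String.toList_ofList, hstrip, List.reverse_reverse, hpart,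
    List.tail_cons, List.reverse_reverse]

theorem pv_intercalate_cons_cons (x : Char) (a b : List Char) (u : List (List Char)) :
    [x].intercalate (a :: b :: u) = a ++ x :: [x].intercalate (b :: u) := by
  simp [List.intercalate, List.intersperse]

theorem pv_intercalate_snoc (x : Char) (ls : List (List Char)) (l : List Char) (h : ls ≠ []) :
    [x].intercalate (ls ++ [l]) = [x].intercalate ls ++ x :: l := by
  induction ls with
  | nil => exact (h rfl).elim
  | cons a t ih =>
    cases t with
    | nil => simp [List.intercalate, List.intersperse]
    | cons b u =>
      have h1 : (a :: b :: u) ++ [l] = a :: b :: (u ++ [l]) := by simp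
      rw [h1, pv_intercalate_cons_cons]
      rw [show b :: (u ++ [l]) = (b :: u) ++ [l] by simp]
      rw [ih (by simp), pv_intercalate_cons_cons]
      simp

theorem pv_join_eq (parts : List String) :
    PySem.Str.join "\n" parts = String.ofList (['\n'].intercalate (parts.map String.toList)) := by
  apply pv_str_eq
  rw [PySem.Str.toList_join]
  simp [PySem.Chars.join]

theorem pv_aux : ∀ (parts : List String), parts ≠ [] →
    (∀ p ∈ parts, '\n' ∉ p.toList) →
    (match rlrPopBlanks parts with
     | none => ""
     | some l =>
       match PySem.List.pop? l with
       | none => ""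
       | some (_, rest) => PySem.Str.join "\n" rest)
    = remove_last_row_alt (String.ofList (['\n'].intercalate (parts.map String.toList))) := by
  intro parts
  induction parts using List.reverseRecOn with
  | nil => intro h; exact (h rfl).elim
  | append_singleton xs x ih =>
    intro _ hfree
    by_cases hx : x = ""
    · subst hx
      rw [pv_rlr_blank]
      by_cases hxs : xs = []
      · subst hxs
        rw [pv_rlr_nil]
        simp [List.intercalate]
        decide
      · rw [ih hxs (fun p hp => hfree p (List.mem_append_left _ hp))]
        have hsnoc : ((xs ++ [("" : String)]).map String.toList)
            = xs.map String.toList ++ [[]] := by simp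
        rw [hsnoc, pv_intercalate_snoc '\n' _ _ (by simpa using hxs), pv_alt_drop]
    · rw [pv_rlr_stop xs x hx]
      simp only []
      rw [pv_pop_concat]
      simp only []
      by_cases hxs : xs = []
      · subst hxs
        have : (([] ++ [x]).map String.toList) = [x.toList] := by simp
        rw [this]
        have hfq : '\n' ∉ x.toList := hfree x (by simp)
        rw [show ['\n'].intercalate [x.toList] = x.toList by simp [List.intercalate]]
        rw [pv_alt_free x.toList hfq]
        apply pv_str_eq
        rw [PySem.Str.toList_join]
        simp [PySem.Chars.join, List.intercalate]
      · have hsnoc : ((xs ++ [x]).map String.toList)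
            = xs.map String.toList ++ [x.toList] := by simp
        rw [hsnoc, pv_intercalate_snoc '\n' _ _ (by simpa using hxs)]
        have hq : x.toList ≠ [] := by
          intro h; exact hx (pv_str_eq (by simp [h]))
        rw [pv_alt_mid _ _ hq (hfree x (List.mem_append_right _ (by simp)))]
        exact pv_join_eq xs

-- ===== VERDICT (by name: the statement is the Claim_ definition above) =====
theorem remove_last_row_spec : Claim_equal_remove_last_row := by
  intro text _
  unfold Spec_remove_last_row
  have hb := PySem.Str.split?_map text "\n"
  rw [show ("\n" : String).toList = ['\n'] from rfl] at hb
  cases hsp : PySem.Str.split? text "\n" with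
  | none =>
    rw [hsp] at hb
    simp [PySem.Chars.split?] at hb
  | some parts =>
    rw [hsp] at hb
    simp [PySem.Chars.split?] at hb
    rw [pv_splitOn_single] at hb
    have hfree : ∀ p ∈ parts, '\n' ∉ p.toList := by
      intro p hp hmem
      exact pv_splitOn_free '\n' text.toList p.toList
        (hb ▸ List.mem_map_of_mem hp) hmem
    have hne : parts ≠ [] := by
      intro h
      rw [h] at hb
      exact List.splitOnP_ne_nil _ _ (by
        have := hb.symm
        simpa [List.splitOn] using this)
    have haux := pv_aux parts hne hfree
    unfold remove_last_row
    rw [hsp]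
    rw [haux, hb, List.intercalate_splitOn, String.ofList_toList]
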